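-- pv_equiv track=rewrite | github.com/monpie3/adventOfCode2024 | Day_25/task_25a.py | count_pins
-- ===== SOURCE A (Python) =====
-- def count_pins(scheme):
--     counter = dict()
--     for row_index in range(len(scheme)):
--         if row_index != 0 and row_index != len(scheme) - 1:
--             for col_index in range(len(scheme[row_index])):
--                 if col_index not in counter:
--                     counter[col_index] = 0
--
--                 if scheme[row_index][col_index] == "#":
--                     counter[col_index] += 1
--     return [counter[pin] for pin in sorted(counter)]
-- ===== SOURCE B (Python) =====
-- def count_pins(scheme):
--     interior = scheme[1:-1]
--     width = max(map(len, interior), default=0)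
--     return [sum(1 for row in interior if col < len(row) and row[col] == "#")
--             for col in range(width)]
-- ===== Notes on version B (the rewrite author's own statement) =====
-- stated objective: idiomatic
-- what changed: Replaced A's row-major double loop that fills a dict keyed by column index and then sorts its keys with a column-major list comprehension over the interior slice scheme[1:-1]: each column's count is computed independently, so the dict accumulator and the sort disappear.
import Mathlib
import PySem

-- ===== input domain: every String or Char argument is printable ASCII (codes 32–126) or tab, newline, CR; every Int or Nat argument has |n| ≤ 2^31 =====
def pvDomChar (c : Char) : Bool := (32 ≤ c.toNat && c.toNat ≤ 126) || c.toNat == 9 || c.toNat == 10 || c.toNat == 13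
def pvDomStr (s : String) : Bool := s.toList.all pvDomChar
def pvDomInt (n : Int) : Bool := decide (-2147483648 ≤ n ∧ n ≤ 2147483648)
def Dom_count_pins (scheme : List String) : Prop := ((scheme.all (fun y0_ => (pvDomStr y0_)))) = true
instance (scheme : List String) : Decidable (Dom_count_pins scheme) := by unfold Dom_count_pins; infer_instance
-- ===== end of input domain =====

-- B re-implements count_pins column-major: a comprehension over the columns of the interior
-- rows, with no dict accumulator and no sort (objective: idiomatic/alternative decomposition).

-- ===== PORT A =====
def count_pins (scheme : List String) : List Int :=
  let counter : PySem.Dict Int Int :=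
    (PySem.List.pyRange 0 (scheme.length : Int)).foldl
      (fun counter row_index =>
        if row_index ≠ 0 ∧ row_index ≠ (scheme.length : Int) - 1 then
          let row := PySem.List.pyGetD scheme row_index ""
          (PySem.List.pyRange 0 (PySem.Str.len row)).foldl
            (fun counter col_index =>
              let counter :=
                if counter.contains col_index = false then counter.insert col_index 0
                else counter
              if PySem.Str.pyGet? row col_index = some '#' then
                counter.insert col_index (counter.getD col_index 0 + 1)
              else counter)
            counter
        else counter)
      PySem.Dict.empty
  (PySem.List.sorted counter.keys (fun pin => pin)).map (fun pin => counter.getD pin 0)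

-- ===== PORT B =====
def count_pins_alt (scheme : List String) : List Int :=
  let interior := PySem.List.slice scheme (some 1) (some (-1))
  let width := PySem.List.maxD (interior.map (fun row => PySem.Str.len row)) (fun x => x) 0
  (PySem.List.pyRange 0 width).map (fun col =>
    (interior.countP (fun row =>
      decide (col < PySem.Str.len row ∧ PySem.Str.pyGet? row col = some '#')) : Int))

-- ===== PRECONDITION & SPEC =====
def Spec_count_pins (scheme : List String) (out : List Int) : Prop := out = count_pins_alt scheme
instance (scheme : List String) (out : List Int) : Decidable (Spec_count_pins scheme out) := by unfold Spec_count_pins; infer_instance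

-- ===== CLAIM (what is proved, stated in full; the proofs are below) =====
def Claim_equal_count_pins : Prop := ∀ (scheme : List String), Dom_count_pins scheme → Spec_count_pins scheme (count_pins scheme)

-- ===== LEMMAS AND PROOFS =====

-- hit predicate shared by both analyses: row contributes to column col
def pvHit (col : Int) (row : String) : Bool :=
  decide (col < PySem.Str.len row ∧ PySem.Str.pyGet? row col = some '#')

-- one inner-loop iteration of A
def pvStep (row : String) (d : PySem.Dict Int Int) (col : Int) : PySem.Dict Int Int :=
  let d := if d.contains col = false then d.insert col 0 else d
  if PySem.Str.pyGet? row col = some '#' then d.insert col (d.getD col 0 + 1) else d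

-- A's whole inner loop over one row
def pvRow (d : PySem.Dict Int Int) (row : String) : PySem.Dict Int Int :=
  (PySem.List.pyRange 0 (PySem.Str.len row)).foldl (pvStep row) d

def pvCast (m : Nat) : List Int := (List.range m).map (fun (k : Nat) => (k : Int))

def pvW (rows : List String) (m : Nat) : Nat := rows.foldl (fun a r => max a r.toList.length) m

theorem pv_mem_pvCast (c : Int) (m : Nat) : c ∈ pvCast m ↔ 0 ≤ c ∧ c < (m : Int) := by
  unfold pvCast
  rw [List.mem_map]
  constructor
  · rintro ⟨k, hk, rfl⟩
    rw [List.mem_range] at hk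
    omega
  · intro ⟨h0, hm⟩
    refine ⟨c.toNat, List.mem_range.mpr ?_, ?_⟩ <;> omega

theorem pv_pvCast_succ (m : Nat) : pvCast (m + 1) = pvCast m ++ [(m : Int)] := by
  simp [pvCast, List.range_succ]

theorem pv_hit_iff (row : String) (col : Int) (h : 0 ≤ col) :
    (PySem.Str.pyGet? row col = some '#') ↔ pvHit col row = true := by
  obtain ⟨n, rfl⟩ := Int.eq_ofNat_of_zero_le h
  simp only [pvHit, decide_eq_true_eq, PySem.Str.pyGet?_natCast, PySem.Str.len_eq]
  constructor
  · intro hsome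
    have hlt : n < row.toList.length := (List.getElem?_eq_some_iff.mp hsome).1
    exact ⟨by exact_mod_cast hlt, hsome⟩
  · exact fun hh => hh.2

theorem pv_step_getD (row : String) (d : PySem.Dict Int Int) (col c : Int) (hcol : 0 ≤ col) :
    (pvStep row d col).getD c 0 =
      d.getD c 0 + (if c = col ∧ pvHit col row = true then 1 else 0) := by
  unfold pvStep
  by_cases hh : PySem.Str.pyGet? row col = some '#'
  · have hhit : pvHit col row = true := (pv_hit_iff row col hcol).mp hh
    rw [if_pos hh]
    simp only [hhit, and_true]
    by_cases hc : d.contains col = false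
    · rw [if_pos hc]
      simp only [PySem.Dict.getD_insert]
      rcases eq_or_ne c col with rfl | hne
      · simp [PySem.Dict.getD_of_not_contains d 0 hc]
      · simp [hne]
    · rw [if_neg hc]
      simp only [PySem.Dict.getD_insert]
      rcases eq_or_ne c col with rfl | hne
      · simp
      · simp [hne]
  · have hcond : ¬ (c = col ∧ pvHit col row = true) :=
      fun hcc => hh ((pv_hit_iff row col hcol).mpr hcc.2)
    rw [if_neg hh, if_neg hcond, add_zero]
    by_cases hc : d.contains col = false
    · rw [if_pos hc]
      simp only [PySem.Dict.getD_insert]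
      rcases eq_or_ne c col with rfl | hne
      · simp [PySem.Dict.getD_of_not_contains d 0 hc]
      · simp [hne]
    · rw [if_neg hc]

theorem pv_step_keys (row : String) (d : PySem.Dict Int Int) (col : Int) :
    (pvStep row d col).keys = if d.contains col = true then d.keys else d.keys ++ [col] := by
  unfold pvStep
  by_cases hc : d.contains col = false
  · rw [if_pos hc, if_neg (show ¬ d.contains col = true by simp [hc])]
    by_cases hh : PySem.Str.pyGet? row col = some '#'
    · rw [if_pos hh, PySem.Dict.keys_insert_of_contains _ _ (PySem.Dict.contains_insert_self d col 0),
        PySem.Dict.keys_insert_of_not_contains d 0 hc]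
    · rw [if_neg hh, PySem.Dict.keys_insert_of_not_contains d 0 hc]
  · have hc' : d.contains col = true := by simpa using hc
    rw [if_neg hc, if_pos hc']
    by_cases hh : PySem.Str.pyGet? row col = some '#'
    · rw [if_pos hh, PySem.Dict.keys_insert_of_contains d _ hc']
    · rw [if_neg hh]

theorem pv_rowN_getD (row : String) (n : Nat) (d : PySem.Dict Int Int) (c : Int) (hc : 0 ≤ c) :
    ((pvCast n).foldl (pvStep row) d).getD c 0 =
      d.getD c 0 + (if c < (n : Int) ∧ pvHit c row = true then 1 else 0) := by
  induction n generalizing d with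
  | zero =>
    rw [show pvCast 0 = [] from rfl]
    simp only [List.foldl_nil, Nat.cast_zero]
    rw [if_neg (fun h => absurd h.1 (by omega)), add_zero]
  | succ m ih =>
    rw [pv_pvCast_succ, List.foldl_append]
    simp only [List.foldl_cons, List.foldl_nil]
    rw [pv_step_getD row _ (m : Int) c (by positivity), ih d]
    push_cast
    by_cases hh : pvHit c row = true
    · by_cases heq : c = (m : Int)
      · rw [← heq]
        simp [hh, show c < c + 1 by omega]
      · simp only [hh, and_true]
        rw [if_neg (show ¬ (c = (m : Int) ∧ pvHit (m : Int) row = true) from fun hcc => heq hcc.1),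
          add_zero, if_congr (show (c < (m : Int)) ↔ (c < (m : Int) + 1) by omega) rfl rfl]
    · by_cases heq : c = (m : Int)
      · rw [← heq]
        simp [hh]
      · simp [hh, heq]

theorem pv_rowN_keys (row : String) (n : Nat) (d : PySem.Dict Int Int) (m : Nat)
    (hk : d.keys = pvCast m) :
    ((pvCast n).foldl (pvStep row) d).keys = pvCast (max m n) := by
  induction n generalizing d with
  | zero => simpa [pvCast] using hk
  | succ j ih =>
    rw [pv_pvCast_succ, List.foldl_append]
    simp only [List.foldl_cons, List.foldl_nil]
    rw [pv_step_keys]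
    have hkeys : ((pvCast j).foldl (pvStep row) d).keys = pvCast (max m j) := ih d hk
    by_cases hcon : ((pvCast j).foldl (pvStep row) d).contains (j : Int) = true
    · have hmem : (j : Int) ∈ pvCast (max m j) := by
        rw [← hkeys]; exact (PySem.Dict.contains_iff_mem_keys _ _).mp hcon
      rw [pv_mem_pvCast] at hmem
      have hmax : max m (j + 1) = max m j := by omega
      rw [if_pos hcon, hkeys, hmax]
    · have hnot : ¬ ((j : Int) ∈ pvCast (max m j)) := by
        rw [← hkeys]; intro h
        exact hcon ((PySem.Dict.contains_iff_mem_keys _ _).mpr h)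
      rw [pv_mem_pvCast] at hnot
      have hmj : max m j = j := by omega
      have hmax : max m (j + 1) = j + 1 := by omega
      rw [if_neg hcon, hkeys, hmj, hmax, pv_pvCast_succ]

theorem pv_row_eq (row : String) (d : PySem.Dict Int Int) :
    pvRow d row = (pvCast row.toList.length).foldl (pvStep row) d := by
  unfold pvRow
  rw [PySem.Str.len_eq, PySem.List.pyRange_one]
  simp [pvCast]

theorem pv_fold (rows : List String) (d : PySem.Dict Int Int) (m : Nat)
    (hk : d.keys = pvCast m) :
    (rows.foldl pvRow d).keys = pvCast (pvW rows m) ∧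
    ∀ c : Int, 0 ≤ c →
      (rows.foldl pvRow d).getD c 0 = d.getD c 0 + (rows.countP (fun r => pvHit c r) : Int) := by
  induction rows generalizing d m with
  | nil => simp [pvW, hk]
  | cons row rest ih =>
    have hrowk : (pvRow d row).keys = pvCast (max m row.toList.length) := by
      rw [pv_row_eq]; exact pv_rowN_keys row _ d m hk
    obtain ⟨ihk, ihv⟩ := ih (pvRow d row) (max m row.toList.length) hrowk
    constructor
    · rw [List.foldl_cons, ihk]; rfl
    · intro c hc
      rw [List.foldl_cons, ihv c hc, pv_row_eq, pv_rowN_getD row _ d c hc]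
      have hiff : (c < (row.toList.length : Int) ∧ pvHit c row = true) ↔ pvHit c row = true := by
        constructor
        · tauto
        · intro h
          refine ⟨?_, h⟩
          simp only [pvHit, decide_eq_true_eq, PySem.Str.len_eq] at h
          exact h.1
      rw [if_congr hiff rfl rfl]
      simp only [List.countP_cons]
      by_cases hh : pvHit c row = true <;> simp [hh]
      ring

theorem pv_slice (l : List String) :
    PySem.List.slice l (some 1) (some (-1)) = (l.drop 1).take (l.length - 2) := by
  cases l with
  | nil => simp [PySem.List.slice]
  | cons x xs =>
    simp only [PySem.List.slice, PySem.List.clampIdx]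
    norm_num
    rw [if_neg (by omega : ¬ (xs.length : Int) < 0)]
    omega

theorem pv_interior (l : List String) :
    (l.dropLast).drop 1 = (l.drop 1).take (l.length - 2) := by
  rw [List.dropLast_eq_take, List.drop_take]
  congr 1

theorem pv_outer (scheme : List String) :
    (PySem.List.pyRange 0 (scheme.length : Int)).foldl
      (fun d i =>
        if i ≠ 0 ∧ i ≠ (scheme.length : Int) - 1 then
          pvRow d (PySem.List.pyGetD scheme i "")
        else d)
      PySem.Dict.empty
    = ((scheme.drop 1).take (scheme.length - 2)).foldl pvRow PySem.Dict.empty := by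
  by_cases h0 : scheme.length = 0
  · rw [List.length_eq_zero_iff.mp h0]
    rfl
  by_cases h1 : scheme.length = 1
  · rw [h1]
    rw [show ((1 : ℕ) : Int) = 0 + 1 by norm_num, PySem.List.pyRange_one_singleton]
    simp
  · have h2 : 2 ≤ scheme.length := by omega
    set n : Int := (scheme.length : Int) with hn
    rw [PySem.List.pyRange_one_append 0 1 n (by omega) (by omega : (1:Int) ≤ n),
        PySem.List.pyRange_one_append 1 (n-1) n (by omega) (by omega),
        show PySem.List.pyRange (n-1) n = [n-1] by
          have hs := PySem.List.pyRange_one_singleton (n-1)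
          rw [show n - 1 + 1 = n by ring] at hs
          exact hs,
        show PySem.List.pyRange 0 1 = [0] from PySem.List.pyRange_one_singleton 0]
    rw [List.foldl_append, List.foldl_append]
    simp only [List.foldl_cons, List.foldl_nil]
    rw [if_neg (by simp)]
    rw [if_neg (by simp)]
    rw [PySem.List.foldl_congr_mem _ _
      (fun d i => pvRow d (PySem.List.pyGetD scheme.dropLast i "")) _ ?_]
    · have hlen : n - 1 = PySem.List.len scheme.dropLast := by
        simp [PySem.List.len, List.length_dropLast]
        omega
      rw [hlen, PySem.List.foldl_pyRange_pyGetD scheme.dropLast "" pvRow PySem.Dict.empty (by omega : (0:Int) ≤ 1)]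
      rw [show (1:Int).toNat = 1 from rfl, pv_interior]
    · intro acc i hi
      rw [PySem.List.mem_pyRange_one] at hi
      rw [if_pos (by constructor <;> omega)]
      congr 1
      rw [PySem.List.pyGetD_eq_getElem scheme "" (by omega) (by omega),
          PySem.List.pyGetD_eq_getElem scheme.dropLast "" (by omega)
            (by rw [List.length_dropLast]; omega)]
      rw [List.getElem_dropLast]

theorem pv_max_fold (f : Option Int → Int → Option Int)
    (hf : ∀ mm x, f (some mm) x = if mm < x then some x else some mm)
    (rows : List String) (m : Nat) :
    List.foldl f (some ((m : Nat) : Int)) (rows.map (fun row => ((row.toList.length : Nat) : Int)))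
    = some ((pvW rows m : Nat) : Int) := by
  induction rows generalizing m with
  | nil => rfl
  | cons row rest ih =>
    simp only [List.map_cons, List.foldl_cons, hf]
    by_cases h : ((m : Nat) : Int) < (row.toList.length : Int)
    · rw [if_pos h, show ((row.toList.length : Nat) : Int) = ((max m row.toList.length : Nat) : Int) by omega]
      exact ih _
    · rw [if_neg h, show ((m : Nat) : Int) = ((max m row.toList.length : Nat) : Int) by omega]
      exact ih _

theorem pv_maxD (rows : List String) :
    PySem.List.maxD (rows.map (fun row => PySem.Str.len row)) (fun x => x) 0
      = ((pvW rows 0 : Nat) : Int) := by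
  cases rows with
  | nil => rfl
  | cons row rest =>
    simp only [PySem.List.maxD, PySem.List.max?, List.map_cons, List.foldl_cons, PySem.Str.len_eq]
    rw [show ((row.toList.length : Nat) : Int) = ((max 0 row.toList.length : Nat) : Int) by omega]
    exact congrArg (fun o : Option Int => o.getD 0)
      (pv_max_fold _ (fun mm x => rfl) rest (max 0 row.toList.length))

theorem pv_pyRange_cast (m : Nat) : PySem.List.pyRange 0 (m : Int) = pvCast m := by
  rw [PySem.List.pyRange_one]
  simp [pvCast]

-- ===== VERDICT (by name: the statement is the Claim_ definition above) =====
theorem count_pins_spec : Claim_equal_count_pins := by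
  intro scheme _
  show count_pins scheme = count_pins_alt scheme
  have hA : count_pins scheme =
      (PySem.List.sorted (((PySem.List.pyRange 0 (scheme.length : Int)).foldl
        (fun d i => if i ≠ 0 ∧ i ≠ (scheme.length : Int) - 1 then pvRow d (PySem.List.pyGetD scheme i "") else d)
        PySem.Dict.empty)).keys (fun pin => pin)).map
        (fun pin => (((PySem.List.pyRange 0 (scheme.length : Int)).foldl
        (fun d i => if i ≠ 0 ∧ i ≠ (scheme.length : Int) - 1 then pvRow d (PySem.List.pyGetD scheme i "") else d)
        PySem.Dict.empty)).getD pin 0) := rfl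
  rw [pv_outer scheme] at hA
  have hB : count_pins_alt scheme =
      (PySem.List.pyRange 0 (PySem.List.maxD ((PySem.List.slice scheme (some 1) (some (-1))).map
        (fun row => PySem.Str.len row)) (fun x => x) 0)).map (fun col =>
        (((PySem.List.slice scheme (some 1) (some (-1))).countP (fun row =>
          decide (col < PySem.Str.len row ∧ PySem.Str.pyGet? row col = some '#'))) : Int)) := rfl
  rw [pv_slice scheme] at hB
  set I : List String := (scheme.drop 1).take (scheme.length - 2) with hIdef
  obtain ⟨hkeys, hval⟩ := pv_fold I PySem.Dict.empty 0 (by simp [pvCast])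
  rw [hA, hB, hkeys, pv_maxD I, pv_pyRange_cast]
  have hsorted : PySem.List.sorted (pvCast (pvW I 0)) (fun pin => pin) = pvCast (pvW I 0) := by
    apply PySem.List.sorted_eq_self_of_pairwise
    simp only [pvCast, List.pairwise_map]
    exact (List.pairwise_lt_range).imp (by intro a b h; exact_mod_cast Nat.le_of_lt h)
  rw [hsorted]
  apply List.map_congr_left
  intro col hcol
  rw [pv_mem_pvCast] at hcol
  rw [hval col hcol.1]
  simp [pvHit]
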